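-- pv_equiv track=rewrite | github.com/alm0st907/school | Previous Classes/code355/Python/HW3.py | charCount2
-- ===== SOURCE A (Python) =====
-- from collections import OrderedDict
--
-- def charCount2(st):
--     #code here
--     try:
--         st = st.replace(' ','')#remove whitespace
--         res2 =[(let,st.count(let)) for let in st] #list comprehens
--         res2.sort(key = lambda x: x[0])
--         res2.sort(key = lambda x: x[1])
--         res2 = list(OrderedDict.fromkeys(res2))#remove duplicates
--         return(res2)
--     except:
--         return []
-- ===== SOURCE B (Python) =====
-- from collections import Counter
--
-- def charCount2(st):
--     try:
--         counts = Counter(st.replace(' ', ''))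
--         return sorted(counts.items(), key=lambda x: (x[1], x[0]))
--     except:
--         return []
-- ===== Notes on version B (the rewrite author's own statement) =====
-- stated objective: faster
-- what changed: Replaces the per-character st.count scans, the two stable sorts of the full occurrence list and the post-sort OrderedDict dedup with a single Counter pass over the string followed by one sort of the distinct (char, count) items on the (count, char) tuple key.
import Mathlib
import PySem

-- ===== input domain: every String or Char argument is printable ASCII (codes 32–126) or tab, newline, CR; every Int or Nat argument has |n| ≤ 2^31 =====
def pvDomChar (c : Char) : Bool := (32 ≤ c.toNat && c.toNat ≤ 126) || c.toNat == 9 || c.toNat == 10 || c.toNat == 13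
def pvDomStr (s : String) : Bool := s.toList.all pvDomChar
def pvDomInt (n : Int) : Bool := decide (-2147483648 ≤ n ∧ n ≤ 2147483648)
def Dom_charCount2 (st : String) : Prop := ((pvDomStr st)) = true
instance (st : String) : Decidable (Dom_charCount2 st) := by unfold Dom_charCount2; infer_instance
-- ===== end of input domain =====

-- B replaces A's quadratic per-character .count scans, double stable sort and
-- post-sort dedup by a single Counter pass followed by one sort on the (count, char)
-- tuple key; same return value.

-- ===== PORT A =====
-- A's try/except: on a String argument nothing in the body raises, so the
-- 'except: return []' branch is unreachable and is not ported.
def charCount2 (st : String) : List (String × Int) :=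
  let s := PySem.Str.replace st " " ""
  let res2 := s.toList.map (fun c => ((String.ofList [c] : String), (PySem.Str.count s (String.ofList [c]) : Int)))
  let res2s := PySem.List.sorted res2 (fun x => x.1)
  let res2ss := PySem.List.sorted res2s (fun x => x.2)
  PySem.List.dedup res2ss

-- ===== PORT B =====
def charCount2_alt (st : String) : List (String × Int) :=
  let s := PySem.Str.replace st " " ""
  let counts := PySem.Dict.counter (s.toList.map (fun c => (String.ofList [c] : String)))
  PySem.List.sorted2 counts.items (fun x => x.2) (fun x => x.1)

-- ===== PRECONDITION & SPEC =====
def Spec_charCount2 (st : String) (out : List (String × Int)) : Prop := out = charCount2_alt st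
instance (st : String) (out : List (String × Int)) : Decidable (Spec_charCount2 st out) := by unfold Spec_charCount2; infer_instance

-- ===== CLAIM (what is proved, stated in full; the proofs are below) =====
def Claim_equal_charCount2 : Prop := ∀ (st : String), Dom_charCount2 st → Spec_charCount2 st (charCount2 st)

-- ===== LEMMAS AND PROOFS =====

-- insertBy is pointwise determined by the 'before' predicate on the inserted element vs list members
theorem insertBy_congr {α : Type} (b1 b2 : α → α → Bool) (x : α) (acc : List α)
    (h : ∀ y ∈ acc, b1 x y = b2 x y) :
    PySem.List.insertBy b1 x acc = PySem.List.insertBy b2 x acc := by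
  induction acc with
  | nil => rfl
  | cons y ys ih =>
    simp only [PySem.List.insertBy]
    rw [h y (by simp)]
    by_cases hb : b2 x y = true
    · simp [hb]
    · simp only [Bool.not_eq_true] at hb
      simp [hb, ih (fun z hz => h z (by simp [hz]))]

-- insertion-sort folds agree when the two 'before' predicates agree on every pair
-- (inserted element, earlier element)
theorem foldl_insertBy_congr {α : Type} (b1 b2 : α → α → Bool) :
    ∀ (xs acc : List α),
    (∀ x ∈ xs, ∀ y ∈ acc, b1 x y = b2 x y) →
    xs.Pairwise (fun y x => b1 x y = b2 x y) →
    xs.foldl (fun acc x => PySem.List.insertBy b1 x acc) acc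
      = xs.foldl (fun acc x => PySem.List.insertBy b2 x acc) acc := by
  intro xs
  induction xs with
  | nil => intro acc _ _; rfl
  | cons x xs ih =>
    intro acc hacc hpw
    have hx : PySem.List.insertBy b1 x acc = PySem.List.insertBy b2 x acc :=
      insertBy_congr b1 b2 x acc (fun y hy => hacc x (by simp) y hy)
    simp only [List.foldl_cons, hx]
    exact ih _
      (fun z hz y hy => by
        rcases (PySem.List.mem_insertBy b2 x y acc).1 hy with rfl | hy'
        · exact (List.pairwise_cons.1 hpw).1 z hz
        · exact hacc z (by simp [hz]) y hy')
      (List.pairwise_cons.1 hpw).2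

-- the tuple-key sort is the sort by the lexicographic key
theorem sorted2_eq_sorted_lex {α κ₁ κ₂ : Type} [LinearOrder κ₁] [LinearOrder κ₂]
    (xs : List α) (k1 : α → κ₁) (k2 : α → κ₂) :
    PySem.List.sorted2 xs k1 k2 = PySem.List.sorted xs (fun x => toLex (k1 x, k2 x)) := by
  rw [PySem.List.sorted_eq_foldl_insertBy]
  show xs.foldl (fun acc x => PySem.List.insertBy _ x acc) [] = _
  apply foldl_insertBy_congr
  · intro _ _ y hy; cases hy
  · apply List.pairwise_of_forall
    intro y x
    rcases lt_trichotomy (k1 x) (k1 y) with h | h | h <;>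
      simp [Prod.Lex.lt_iff, h, not_lt_of_gt, ne_of_lt]

-- stability: sorting a k2-sorted list by k1 is the sort by the (k1, k2) tuple key
theorem sorted_sorted_eq_sorted2 {α κ₁ κ₂ : Type} [LinearOrder κ₁] [LinearOrder κ₂]
    (xs : List α) (k1 : α → κ₁) (k2 : α → κ₂)
    (hs : xs.Pairwise (fun a b => k2 a ≤ k2 b)) :
    PySem.List.sorted xs k1 = PySem.List.sorted2 xs k1 k2 := by
  rw [PySem.List.sorted_eq_foldl_insertBy]
  show _ = xs.foldl (fun acc x => PySem.List.insertBy _ x acc) []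
  apply foldl_insertBy_congr
  · intro _ _ y hy; cases hy
  · refine hs.imp ?_
    intro a b hle
    have : ¬ (k2 b < k2 a) := not_lt_of_ge hle
    simp [this]

-- list(dict.fromkeys(xs)) is a sublist of xs
theorem foldl_setAdd_sublist {α : Type} [BEq α] [LawfulBEq α] :
    ∀ (xs s : List α), (xs.foldl PySem.Set.add s).Sublist (s ++ xs) := by
  intro xs
  induction xs with
  | nil => intro s; simp
  | cons x xs ih =>
    intro s
    simp only [List.foldl_cons]
    refine (ih (PySem.Set.add s x)).trans ?_
    have : (PySem.Set.add s x).Sublist (s ++ [x]) := by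
      unfold PySem.Set.add
      split
      · exact (List.sublist_append_left s [x])
      · exact List.Sublist.refl _
    calc (PySem.Set.add s x ++ xs).Sublist ((s ++ [x]) ++ xs) :=
          List.Sublist.append_right this xs
      _ = s ++ (x :: xs) := by simp

theorem dedup_sublist {α : Type} [BEq α] [LawfulBEq α] (xs : List α) :
    (PySem.List.dedup xs).Sublist xs := by
  have := foldl_setAdd_sublist xs []
  simpa [PySem.List.dedup, PySem.Set.ofList] using this

-- counting a one-character needle is counting the character
theorem chars_count_go_singleton (c : Char) :
    ∀ (fuel : Nat) (l : List Char) (acc : Nat), l.length ≤ fuel →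
    PySem.Chars.count.go [c] fuel l acc = acc + l.count c := by
  intro fuel
  induction fuel with
  | zero =>
    intro l acc h
    have hl : l = [] := List.length_eq_zero_iff.mp (Nat.le_zero.mp h)
    subst hl
    simp [PySem.Chars.count.go]
  | succ n ih =>
    intro l acc h
    cases l with
    | nil => simp [PySem.Chars.count.go]
    | cons x t =>
      simp only [PySem.Chars.count.go]
      by_cases hc : c = x
      · subst hc
        have hp : List.isPrefixOf [c] (c :: t) = true := by simp [List.isPrefixOf]
        simp only [hp, if_true, List.length_cons, List.length_nil, List.drop_succ_cons,
          List.drop_zero]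
        rw [ih t (acc + 1) (by simp at h; omega)]
        simp
        omega
      · have hp : List.isPrefixOf [c] (x :: t) = true ↔ False := by
          simp [List.isPrefixOf, hc]
        simp only [eq_false hp.mp, if_false]
        rw [ih t acc (by simp at h; omega)]
        simp [Ne.symm hc]

theorem chars_count_singleton (l : List Char) (c : Char) :
    PySem.Chars.count l [c] = l.count c := by
  unfold PySem.Chars.count
  simpa using chars_count_go_singleton c l.length l 0 le_rfl

theorem mkStr_injective : Function.Injective (fun c => (String.ofList [c] : String)) := by
  intro a b h
  have h2 := congrArg String.toList h
  simpa using h2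

-- the common lexicographic key (count, char) and its injectivity
theorem lexkey_injective :
    Function.Injective (fun x : String × Int => toLex (x.2, x.1)) := by
  intro a b h
  have := congrArg ofLex h
  simp at this
  exact Prod.ext this.2 this.1

theorem pairfst_injective {g : String → Int} :
    Function.Injective (fun k : String => (k, g k)) := by
  intro a b h
  simpa using congrArg Prod.fst h

theorem charCount2_eq (st : String) : charCount2 st = charCount2_alt st := by
  simp only [charCount2, charCount2_alt]
  set s := PySem.Str.replace st " " "" with hs
  set cl := s.toList with hcl
  set l : List String := cl.map (fun c => (String.ofList [c] : String)) with hl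
  set g : String → String × Int := fun k => (k, (PySem.Str.count s k : Int)) with hg
  -- A's pair list factors through the one-char strings
  have hmapA : cl.map (fun c => ((String.ofList [c] : String), (PySem.Str.count s (String.ofList [c]) : Int)))
      = l.map g := by
    simp [hl, List.map_map, Function.comp_def, hg]
  rw [hmapA, PySem.Dict.items_counter]
  -- the two counting schemes agree on members of l
  have hcount : ∀ k ∈ PySem.Set.ofList l, (fun k => (k, (List.count k l : Int))) k = g k := by
    intro k hk
    rcases List.mem_map.1 ((PySem.Set.mem_ofList l k).1 hk) with ⟨c, hc, rfl⟩
    have h1 : List.count (String.ofList [c] : String) l = cl.count c := by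
      simpa [hl] using List.count_map_of_injective cl _ mkStr_injective c
    have h2 : PySem.Str.count s (String.ofList [c]) = cl.count c := by
      rw [PySem.Str.count_eq]
      simpa [hcl] using chars_count_singleton s.toList c
    simp only [hg]
    rw [h1, h2]
  rw [List.map_congr_left hcount]
  -- both sides become sorts by the lexicographic (count, char) key
  set lexkey : String × Int → Lex (Int × String) := fun x => toLex (x.2, x.1) with hlex
  set P := l.map g with hP
  set Q := (PySem.Set.ofList l).map g with hQ
  have hA : PySem.List.sorted (PySem.List.sorted P (fun x => x.1)) (fun x => x.2)
      = PySem.List.sorted P lexkey := by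
    rw [sorted_sorted_eq_sorted2 _ _ (fun x => x.1) (PySem.List.sorted_pairwise P (fun x => x.1)),
        sorted2_eq_sorted_lex]
    exact PySem.List.sorted_eq_sorted_of_perm _ _ _ lexkey_injective
      (PySem.List.sorted_perm P (fun x => x.1) false)
  have hB : PySem.List.sorted2 Q (fun x => x.2) (fun x => x.1)
      = PySem.List.sorted Q lexkey := sorted2_eq_sorted_lex Q _ _
  rw [hA, hB]
  -- dedup of A's sorted list is exactly the strictly increasing arrangement of Q
  refine (PySem.List.sorted_eq_of_perm_of_pairwise_lt Q
    (PySem.List.dedup (PySem.List.sorted P lexkey)) lexkey ?_ ?_).symm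
  · -- permutation: both are nodup with the same members
    have hnodupD := PySem.List.nodup_dedup (PySem.List.sorted P lexkey)
    have hnodupQ : Q.Nodup := (PySem.Set.nodup_ofList l).map pairfst_injective
    refine (List.perm_ext_iff_of_nodup hnodupD hnodupQ).2 ?_
    intro x
    rw [PySem.List.mem_dedup, PySem.List.mem_sorted, hP, hQ]
    constructor
    · rintro hx
      rcases List.mem_map.1 hx with ⟨k, hk, rfl⟩
      exact List.mem_map.2 ⟨k, (PySem.Set.mem_ofList l k).2 hk, rfl⟩
    · rintro hx
      rcases List.mem_map.1 hx with ⟨k, hk, rfl⟩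
      exact List.mem_map.2 ⟨k, (PySem.Set.mem_ofList l k).1 hk, rfl⟩
  · -- strictly increasing: pairwise ≤ from the sort, strict from nodup + key injectivity
    have hle : (PySem.List.sorted P lexkey).Pairwise (fun a b => lexkey a ≤ lexkey b) :=
      PySem.List.sorted_pairwise P lexkey
    have hsub := dedup_sublist (PySem.List.sorted P lexkey)
    have hle' := hle.sublist hsub
    have hne : (PySem.List.dedup (PySem.List.sorted P lexkey)).Pairwise (· ≠ ·) :=
      PySem.List.nodup_dedup _
    refine (hle'.and hne).imp ?_
    rintro a b ⟨h1, h2⟩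
    exact lt_of_le_of_ne h1 (fun he => h2 (lexkey_injective he))

-- ===== VERDICT (by name: the statement is the Claim_ definition above) =====
theorem charCount2_spec : Claim_equal_charCount2 := by
  intro st _
  unfold Spec_charCount2
  exact charCount2_eq st
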